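-- pv_equiv track=rewrite | github.com/weiyangzen/awesome_algorithms | Algorithms/计算机-图算法-0044-欧拉路径／回路算法/demo.py | is_weakly_connected_nonzero_directed
-- ===== SOURCE A (Python) =====
-- from collections import Counter, deque
-- from typing import List, Sequence, Tuple
--
-- def is_weakly_connected_nonzero_directed(
--     n: int,
--     out_adj: Sequence[Sequence[Tuple[int, int]]],
--     indeg: Sequence[int],
--     outdeg: Sequence[int],
-- ) -> bool:
--     """Return True if all non-zero-degree vertices are weakly connected."""
--     undirected_adj: List[List[int]] = [[] for _ in range(n)]
--     for u in range(n):
--         for v, _eid in out_adj[u]: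
--             undirected_adj[u].append(v)
--             undirected_adj[v].append(u)
--
--     start = next((v for v in range(n) if indeg[v] + outdeg[v] > 0), None)
--     if start is None:
--         return True
--
--     seen = [False] * n
--     q: deque[int] = deque([start])
--     seen[start] = True
--
--     while q:
--         v = q.popleft()
--         for to in undirected_adj[v]:
--             if not seen[to]:
--                 seen[to] = True
--                 q.append(to)
--
--     return all(seen[v] for v in range(n) if indeg[v] + outdeg[v] > 0)
-- ===== SOURCE B (Python) =====
-- def is_weakly_connected_nonzero_directed(n, out_adj, indeg, outdeg):
--     """Return True if all non-zero-degree vertices are weakly connected.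
--
--     Edge-centric relaxation instead of BFS: flatten the adjacency into one
--     edge list, then repeatedly sweep it, marking both endpoints of any edge
--     with exactly one marked endpoint, until a sweep changes nothing.
--     """
--     edges = [(u, v) for u in range(n) for v, _eid in out_adj[u]]
--
--     start = next((v for v in range(n) if indeg[v] + outdeg[v] > 0), None)
--     if start is None:
--         return True
--
--     seen = [False] * n
--     seen[start] = True
--
--     changed = True
--     while changed:
--         changed = False
--         for u, v in edges:
--             if seen[u] != seen[v]:
--                 seen[u] = True
--                 seen[v] = True
--                 changed = True
--
--     return all(seen[v] for v in range(n) if indeg[v] + outdeg[v] > 0)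
-- ===== Notes on version B (the rewrite author's own statement) =====
-- stated objective: alternative
-- what changed: Replaces the queue-based BFS over a freshly built undirected adjacency structure by edge-centric relaxation: the adjacency is flattened once into an edge list, which is swept repeatedly, marking both endpoints of any half-marked edge, until a sweep changes nothing.
-- outside the precondition, e.g. on is_weakly_connected_nonzero_directed(3, [[], [], []], [1, 1], [0, 0]): A returns False, B returns False; on is_weakly_connected_nonzero_directed(2, [[(-1, 0)], []], [0, 1], [1, 0]): A returns True, B returns True
import Mathlib
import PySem

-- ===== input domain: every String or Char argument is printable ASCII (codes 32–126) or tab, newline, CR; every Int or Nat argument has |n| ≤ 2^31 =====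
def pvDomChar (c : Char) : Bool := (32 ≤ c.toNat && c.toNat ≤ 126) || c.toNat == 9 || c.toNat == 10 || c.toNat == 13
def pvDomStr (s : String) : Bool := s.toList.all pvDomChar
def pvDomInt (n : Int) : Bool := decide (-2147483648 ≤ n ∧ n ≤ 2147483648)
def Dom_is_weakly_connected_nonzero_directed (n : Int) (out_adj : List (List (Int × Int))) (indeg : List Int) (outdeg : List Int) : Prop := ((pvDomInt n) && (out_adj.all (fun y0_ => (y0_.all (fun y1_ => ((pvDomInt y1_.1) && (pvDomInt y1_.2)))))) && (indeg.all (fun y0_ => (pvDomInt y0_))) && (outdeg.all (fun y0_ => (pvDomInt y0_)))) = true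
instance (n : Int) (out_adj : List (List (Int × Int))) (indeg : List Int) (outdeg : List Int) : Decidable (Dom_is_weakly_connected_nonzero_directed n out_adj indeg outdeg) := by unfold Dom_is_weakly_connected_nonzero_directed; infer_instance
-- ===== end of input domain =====

-- B changes the algorithm (edge-list relaxation sweeps instead of BFS over a built adjacency
-- structure), not the result; equivalence is about the return value (neither Python mutates
-- its arguments).

-- ===== PORT A =====
-- for u in range(n): for (v, _eid) in out_adj[u]: adj[u].append(v); adj[v].append(u)
def pvA_buildAdj (n : Int) (out_adj : List (List (Int × Int))) : List (List Int) :=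
  (PySem.List.pyRange 0 n 1).foldl
    (fun adj u =>
      (PySem.List.pyGetD out_adj u []).foldl
        (fun adj p =>
          let adj1 := PySem.List.pySetD adj u (PySem.List.pyGetD adj u [] ++ [p.1])
          PySem.List.pySetD adj1 p.1 (PySem.List.pyGetD adj1 p.1 [] ++ [u]))
        adj)
    (List.replicate n.toNat [])

-- the BFS while-loop; fuel only makes the recursion total (it is proved sufficient below)
def pvA_bfs (adj : List (List Int)) : Nat → List Bool → List Int → List Bool
  | 0, seen, _ => seen
  | fuel + 1, seen, q =>
    match q with
    | [] => seen
    | v :: rest =>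
      let st :=
        (PySem.List.pyGetD adj v []).foldl
          (fun (st : List Bool × List Int) tov =>
            if PySem.List.pyGetD st.1 tov false = false then
              (PySem.List.pySetD st.1 tov true, st.2 ++ [tov])
            else st)
          (seen, rest)
      pvA_bfs adj fuel st.1 st.2

def is_weakly_connected_nonzero_directed (n : Int) (out_adj : List (List (Int × Int))) (indeg : List Int) (outdeg : List Int) : Bool :=
  let adj := pvA_buildAdj n out_adj
  match (PySem.List.pyRange 0 n 1).find?
      (fun v => decide (0 < PySem.List.pyGetD indeg v 0 + PySem.List.pyGetD outdeg v 0)) with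
  | none => true
  | some start =>
    let seen := PySem.List.pySetD (List.replicate n.toNat false) start true
    let seen := pvA_bfs adj (2 * n.toNat + 1) seen [start]
    (PySem.List.pyRange 0 n 1).all
      (fun v =>
        if 0 < PySem.List.pyGetD indeg v 0 + PySem.List.pyGetD outdeg v 0 then
          PySem.List.pyGetD seen v false
        else true)

-- ===== PORT B =====
-- edges = [(u, v) for u in range(n) for v, _eid in out_adj[u]]
def pvB_edges (n : Int) (out_adj : List (List (Int × Int))) : List (Int × Int) :=
  (PySem.List.pyRange 0 n 1).foldl
    (fun acc u => acc ++ (PySem.List.pyGetD out_adj u []).map (fun p => (u, p.1)))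
    []

-- one sweep of the edge list: 'for u, v in edges: if seen[u] != seen[v]: …'
def pvB_pass (edges : List (Int × Int)) (seen : List Bool) : List Bool × Bool :=
  edges.foldl
    (fun (st : List Bool × Bool) e =>
      if PySem.List.pyGetD st.1 e.1 false ≠ PySem.List.pyGetD st.1 e.2 false then
        (PySem.List.pySetD (PySem.List.pySetD st.1 e.1 true) e.2 true, true)
      else st)
    (seen, false)

-- 'while changed' loop; fuel only makes the recursion total (it is proved sufficient below)
def pvB_loop (edges : List (Int × Int)) : Nat → List Bool → List Bool
  | 0, seen => seen
  | fuel + 1, seen =>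
    let st := pvB_pass edges seen
    if st.2 then pvB_loop edges fuel st.1 else st.1

def is_weakly_connected_nonzero_directed_alt (n : Int) (out_adj : List (List (Int × Int))) (indeg : List Int) (outdeg : List Int) : Bool :=
  let edges := pvB_edges n out_adj
  match (PySem.List.pyRange 0 n 1).find?
      (fun v => decide (0 < PySem.List.pyGetD indeg v 0 + PySem.List.pyGetD outdeg v 0)) with
  | none => true
  | some start =>
    let seen := PySem.List.pySetD (List.replicate n.toNat false) start true
    let seen := pvB_loop edges n.toNat seen
    (PySem.List.pyRange 0 n 1).all
      (fun v =>
        if 0 < PySem.List.pyGetD indeg v 0 + PySem.List.pyGetD outdeg v 0 then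
          PySem.List.pyGetD seen v false
        else true)

-- ===== PRECONDITION & SPEC =====
-- Pre_ restricts to the natural domain of an n-vertex adjacency structure: the three arrays
-- cover range(n) and every edge target is a vertex id in [0, n).  It excludes (a) inputs where
-- A raises an IndexError (arrays shorter than n that A happens to index, edge targets outside
-- [-n, n)), and (b) malformed inputs outside that natural domain on which A still returns:
-- degree arrays shorter than n whose scan short-circuits, and negative edge targets, which
-- Python's negative-index wraparound treats as vertex n+v.
def Pre_is_weakly_connected_nonzero_directed (n : Int) (out_adj : List (List (Int × Int))) (indeg : List Int) (outdeg : List Int) : Prop :=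
  n ≤ (out_adj.length : Int) ∧ n ≤ (indeg.length : Int) ∧ n ≤ (outdeg.length : Int) ∧
  ∀ u ∈ PySem.List.pyRange 0 n 1, ∀ p ∈ PySem.List.pyGetD out_adj u [], 0 ≤ p.1 ∧ p.1 < n

instance (n : Int) (out_adj : List (List (Int × Int))) (indeg : List Int) (outdeg : List Int) : Decidable (Pre_is_weakly_connected_nonzero_directed n out_adj indeg outdeg) := by unfold Pre_is_weakly_connected_nonzero_directed; infer_instance

def pvWitness_is_weakly_connected_nonzero_directed : Int × (List (List (Int × Int))) × List Int × List Int :=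
  (2, [[(1, 0)], []], [0, 1], [1, 0])

def Spec_is_weakly_connected_nonzero_directed (n : Int) (out_adj : List (List (Int × Int))) (indeg : List Int) (outdeg : List Int) (out : Bool) : Prop := out = is_weakly_connected_nonzero_directed_alt n out_adj indeg outdeg
instance (n : Int) (out_adj : List (List (Int × Int))) (indeg : List Int) (outdeg : List Int) (out : Bool) : Decidable (Spec_is_weakly_connected_nonzero_directed n out_adj indeg outdeg out) := by unfold Spec_is_weakly_connected_nonzero_directed; infer_instance

-- ===== CLAIM (what is proved, stated in full; the proofs are below) =====
def Claim_equal_is_weakly_connected_nonzero_directed : Prop := ∀ (n : Int) (out_adj : List (List (Int × Int))) (indeg : List Int) (outdeg : List Int), Dom_is_weakly_connected_nonzero_directed n out_adj indeg outdeg → Pre_is_weakly_connected_nonzero_directed n out_adj indeg outdeg → Spec_is_weakly_connected_nonzero_directed n out_adj indeg outdeg (is_weakly_connected_nonzero_directed n out_adj indeg outdeg)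

-- ===== LEMMAS AND PROOFS =====

def pvGet (s : List Bool) (i : Int) : Bool := PySem.List.pyGetD s i false
def pvAdjGet (adj : List (List Int)) (i : Int) : List Int := PySem.List.pyGetD adj i []
def pvCntT (s : List Bool) : Nat := s.count true
def pvCntF (s : List Bool) : Nat := s.count false

theorem pvGet_eq (s : List Bool) (i : Int) (h0 : 0 ≤ i) (h1 : i < s.length) :
    pvGet s i = s[i.toNat]'(by omega) := PySem.List.pyGetD_eq_getElem _ _ h0 h1

theorem pvGet_set (s : List Bool) (i j : Int) (b : Bool) (h0 : 0 ≤ i) (_h1 : i < s.length)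
    (h0' : 0 ≤ j) (h1' : j < s.length) :
    pvGet (PySem.List.pySetD s i b) j = if j = i then b else pvGet s j := by
  rw [show PySem.List.pySetD s i b = s.set i.toNat b from PySem.List.pySetD_of_nonneg _ _ h0]
  rw [pvGet_eq _ _ h0' (by simpa), pvGet_eq _ _ h0' h1']
  rw [List.getElem_set]
  split_ifs with ha hb hc <;> first | rfl | omega

theorem pvAdjGet_set (adj : List (List Int)) (i j : Int) (x : List Int) (h0 : 0 ≤ i)
    (h1 : i < adj.length) (h0' : 0 ≤ j) (h1' : j < adj.length) :
    pvAdjGet (PySem.List.pySetD adj i x) j = if j = i then x else pvAdjGet adj j := by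
  rw [show PySem.List.pySetD adj i x = adj.set i.toNat x from PySem.List.pySetD_of_nonneg _ _ h0]
  rw [show pvAdjGet (adj.set i.toNat x) j = (adj.set i.toNat x)[j.toNat]'(by simpa using by omega) from PySem.List.pyGetD_eq_getElem _ _ h0' (by simpa)]
  rw [show pvAdjGet adj j = adj[j.toNat]'(by omega) from PySem.List.pyGetD_eq_getElem _ _ h0' h1']
  rw [List.getElem_set]
  split_ifs with ha hb hc <;> first | rfl | omega

theorem pvCntT_set_true (s : List Bool) (i : Nat) (h : i < s.length) (hs : s[i] = false) :
    pvCntT (s.set i true) = pvCntT s + 1 := by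
  unfold pvCntT
  rw [List.set_eq_take_append_cons_drop, if_pos h]
  conv_rhs => rw [← List.take_append_drop i s, List.drop_eq_getElem_cons h]
  simp [List.count_append, hs]; omega

theorem pvCntT_set_true_le (s : List Bool) (i : Nat) :
    pvCntT s ≤ pvCntT (s.set i true) := by
  unfold pvCntT
  by_cases h : i < s.length
  · rw [List.set_eq_take_append_cons_drop, if_pos h]
    conv_lhs => rw [← List.take_append_drop i s, List.drop_eq_getElem_cons h]
    cases s[i] <;> simp [List.count_append] <;> omega
  · rw [List.set_eq_take_append_cons_drop, if_neg h]

theorem pvCnt_add (s : List Bool) : pvCntT s + pvCntF s = s.length :=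
  List.count_true_add_count_false s

theorem pvCntT_le (s : List Bool) : pvCntT s ≤ s.length := List.count_le_length

def pvEdge (n : Int) (out_adj : List (List (Int × Int))) (u v : Int) : Prop :=
  0 ≤ u ∧ u < n ∧ ∃ eid, (v, eid) ∈ PySem.List.pyGetD out_adj u []

def pvR (n : Int) (out_adj : List (List (Int × Int))) (u v : Int) : Prop :=
  pvEdge n out_adj u v ∨ pvEdge n out_adj v u

def pvA_innerF (u : Int) (adj : List (List Int)) (p : Int × Int) : List (List Int) :=
  let adj1 := PySem.List.pySetD adj u (PySem.List.pyGetD adj u [] ++ [p.1])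
  PySem.List.pySetD adj1 p.1 (PySem.List.pyGetD adj1 p.1 [] ++ [u])

theorem pvA_innerF_len (u : Int) (adj : List (List Int)) (p : Int × Int) :
    (pvA_innerF u adj p).length = adj.length := by
  simp [pvA_innerF, PySem.List.length_pySetD]

theorem pvA_innerF_char (n : Int) (u : Int) (adj : List (List Int)) (p : Int × Int)
    (hlen : (adj.length : Int) = n) (hu0 : 0 ≤ u) (hu1 : u < n) (hp0 : 0 ≤ p.1) (hp1 : p.1 < n)
    (v w : Int) (hv0 : 0 ≤ v) (hv1 : v < n) :
    (w ∈ pvAdjGet (pvA_innerF u adj p) v ↔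
      w ∈ pvAdjGet adj v ∨ (v = u ∧ w = p.1) ∨ (v = p.1 ∧ w = u)) := by
  unfold pvA_innerF
  have hL1 : ((PySem.List.pySetD adj u (PySem.List.pyGetD adj u [] ++ [p.1])).length : Int) = n := by
    rw [PySem.List.length_pySetD]; exact hlen
  rw [pvAdjGet_set _ _ _ _ hp0 (by omega) hv0 (by omega)]
  have h1 : ∀ j, 0 ≤ j → j < n →
      pvAdjGet (PySem.List.pySetD adj u (PySem.List.pyGetD adj u [] ++ [p.1])) j
      = if j = u then pvAdjGet adj u ++ [p.1] else pvAdjGet adj j := fun j hj0 hj1 =>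
    pvAdjGet_set _ _ _ _ hu0 (by omega) hj0 (by omega)
  show (w ∈ if v = p.1 then PySem.List.pyGetD (PySem.List.pySetD adj u (PySem.List.pyGetD adj u [] ++ [p.1])) p.1 [] ++ [u]
      else pvAdjGet (PySem.List.pySetD adj u (PySem.List.pyGetD adj u [] ++ [p.1])) v) ↔ _
  have h2 : PySem.List.pyGetD (PySem.List.pySetD adj u (PySem.List.pyGetD adj u [] ++ [p.1])) p.1 []
      = pvAdjGet (PySem.List.pySetD adj u (PySem.List.pyGetD adj u [] ++ [p.1])) p.1 := rfl
  rw [h2]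
  split_ifs with hvp
  · rw [h1 p.1 hp0 hp1]
    split_ifs with hpu
    · subst hvp; subst hpu; simp only [List.mem_append, List.mem_singleton]; tauto
    · subst hvp; simp only [List.mem_append, List.mem_singleton]; tauto
  · rw [h1 v hv0 hv1]
    split_ifs with hvu
    · subst hvu; simp only [List.mem_append, List.mem_singleton]; tauto
    · tauto

def pvA_inner (u : Int) (es : List (Int × Int)) (adj : List (List Int)) : List (List Int) :=
  es.foldl (pvA_innerF u) adj

theorem pvA_inner_len (u : Int) (es : List (Int × Int)) :
    ∀ adj, (pvA_inner u es adj).length = adj.length := by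
  induction es with
  | nil => intro adj; rfl
  | cons p es ih => intro adj; rw [pvA_inner, List.foldl_cons, ← pvA_inner, ih, pvA_innerF_len]

theorem pvA_inner_char (n : Int) (u : Int) (es : List (Int × Int)) :
    ∀ adj, (adj.length : Int) = n → 0 ≤ u → u < n → (∀ p ∈ es, 0 ≤ p.1 ∧ p.1 < n) →
    ∀ v w, 0 ≤ v → v < n →
    (w ∈ pvAdjGet (pvA_inner u es adj) v ↔
      w ∈ pvAdjGet adj v ∨ (v = u ∧ ∃ eid, (w, eid) ∈ es) ∨ (w = u ∧ ∃ eid, (v, eid) ∈ es)) := by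
  induction es with
  | nil => intro adj _ _ _ _ v w _ _; simp [pvA_inner]
  | cons p es ih =>
    intro adj hlen hu0 hu1 hb v w hv0 hv1
    have hp := hb p (by simp)
    rw [pvA_inner, List.foldl_cons, ← pvA_inner]
    rw [ih (pvA_innerF u adj p) (by rw [pvA_innerF_len]; exact hlen) hu0 hu1
      (fun q hq => hb q (by simp [hq])) v w hv0 hv1]
    rw [pvA_innerF_char n u adj p hlen hu0 hu1 hp.1 hp.2 v w hv0 hv1]
    constructor
    · rintro (( h | ⟨h1, h2⟩ | ⟨h1, h2⟩) | ⟨h1, eid, h2⟩ | ⟨h1, eid, h2⟩)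
      · exact Or.inl h
      · exact Or.inr (Or.inl ⟨h1, p.2, by simp [h2]⟩)
      · exact Or.inr (Or.inr ⟨h2, p.2, by simp [h1]⟩)
      · exact Or.inr (Or.inl ⟨h1, eid, by simp [h2]⟩)
      · exact Or.inr (Or.inr ⟨h1, eid, by simp [h2]⟩)
    · rintro (h | ⟨h1, eid, h2⟩ | ⟨h1, eid, h2⟩)
      · exact Or.inl (Or.inl h)
      · rcases List.mem_cons.1 h2 with h3 | h3
        · exact Or.inl (Or.inr (Or.inl ⟨h1, by cases h3; rfl⟩))
        · exact Or.inr (Or.inl ⟨h1, eid, h3⟩)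
      · rcases List.mem_cons.1 h2 with h3 | h3
        · exact Or.inl (Or.inr (Or.inr ⟨by cases h3; rfl, h1⟩))
        · exact Or.inr (Or.inr ⟨h1, eid, h3⟩)

theorem pvA_outer_char (n : Int) (out_adj : List (List (Int × Int))) (us : List Int) :
    ∀ adj : List (List Int), (adj.length : Int) = n → (∀ u ∈ us, 0 ≤ u ∧ u < n) →
    (∀ u ∈ us, ∀ p ∈ PySem.List.pyGetD out_adj u [], 0 ≤ p.1 ∧ p.1 < n) →
    ∀ v w, 0 ≤ v → v < n →
    (w ∈ pvAdjGet (us.foldl (fun adj u => pvA_inner u (PySem.List.pyGetD out_adj u []) adj) adj) v ↔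
      w ∈ pvAdjGet adj v
      ∨ (v ∈ us ∧ ∃ eid, (w, eid) ∈ PySem.List.pyGetD out_adj v [])
      ∨ (w ∈ us ∧ 0 ≤ w ∧ w < n ∧ ∃ eid, (v, eid) ∈ PySem.List.pyGetD out_adj w [])) := by
  induction us with
  | nil => intro adj _ _ _ v w _ _; simp
  | cons u us ih =>
    intro adj hlen hu hb v w hv0 hv1
    have hu1 := hu u (by simp)
    rw [List.foldl_cons]
    rw [ih (pvA_inner u (PySem.List.pyGetD out_adj u []) adj)
      (by rw [pvA_inner_len]; exact hlen)
      (fun x hx => hu x (by simp [hx])) (fun x hx => hb x (by simp [hx])) v w hv0 hv1]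
    rw [pvA_inner_char n u (PySem.List.pyGetD out_adj u []) adj hlen hu1.1 hu1.2
      (hb u (by simp)) v w hv0 hv1]
    constructor
    · rintro ((h | ⟨h1, h2⟩ | ⟨h1, h2⟩) | ⟨h1, h2⟩ | ⟨h1, h2, h3, h4⟩)
      · exact Or.inl h
      · exact Or.inr (Or.inl ⟨by simp [h1], h1 ▸ h2⟩)
      · rcases h2 with ⟨eid, h2⟩
        exact Or.inr (Or.inr ⟨by simp [h1], h1 ▸ hu1.1, h1 ▸ hu1.2, h1 ▸ ⟨eid, h2⟩⟩)
      · exact Or.inr (Or.inl ⟨by simp [h1], h2⟩)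
      · exact Or.inr (Or.inr ⟨by simp [h1], h2, h3, h4⟩)
    · rintro (h | ⟨h1, h2⟩ | ⟨h1, h2, h3, h4⟩)
      · exact Or.inl (Or.inl h)
      · rcases List.mem_cons.1 h1 with h5 | h5
        · exact Or.inl (Or.inr (Or.inl ⟨h5, h5 ▸ h2⟩))
        · exact Or.inr (Or.inl ⟨h5, h2⟩)
      · rcases List.mem_cons.1 h1 with h5 | h5
        · exact Or.inl (Or.inr (Or.inr ⟨h5, h5 ▸ h4⟩))
        · exact Or.inr (Or.inr ⟨h5, h2, h3, h4⟩)

def pvA_bfsF (st : List Bool × List Int) (tov : Int) : List Bool × List Int :=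
  if PySem.List.pyGetD st.1 tov false = false then
    (PySem.List.pySetD st.1 tov true, st.2 ++ [tov])
  else st

theorem pvCntF_set_true (s : List Bool) (i : Int) (h0 : 0 ≤ i) (h1 : i < s.length)
    (hs : pvGet s i = false) :
    pvCntF (PySem.List.pySetD s i true) + 1 = pvCntF s := by
  have he : PySem.List.pySetD s i true = s.set i.toNat true := PySem.List.pySetD_of_nonneg _ _ h0
  have hst : s[i.toNat]'(by omega) = false := by rw [← pvGet_eq s i h0 h1]; exact hs
  have h2 := pvCntT_set_true s i.toNat (by omega) hst
  have h3 := pvCnt_add (s.set i.toNat true)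
  have h4 := pvCnt_add s
  rw [List.length_set] at h3
  rw [he]; omega

theorem pvA_fold (n : Int) (l : List Int) :
    ∀ (seen : List Bool) (q : List Int), (seen.length : Int) = n → (∀ x ∈ l, 0 ≤ x ∧ x < n) →
    (∀ x ∈ q, 0 ≤ x ∧ x < n) →
    (((List.foldl pvA_bfsF (seen, q) l).1.length : Int) = n)
    ∧ (∀ j, 0 ≤ j → j < n → pvGet seen j = true → pvGet (List.foldl pvA_bfsF (seen, q) l).1 j = true)
    ∧ (∀ x ∈ l, pvGet (List.foldl pvA_bfsF (seen, q) l).1 x = true)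
    ∧ (∀ x ∈ q, x ∈ (List.foldl pvA_bfsF (seen, q) l).2)
    ∧ (∀ x ∈ (List.foldl pvA_bfsF (seen, q) l).2, x ∈ q ∨ x ∈ l)
    ∧ (∀ x, 0 ≤ x → x < n → pvGet (List.foldl pvA_bfsF (seen, q) l).1 x = true →
        pvGet seen x = true ∨ x ∈ (List.foldl pvA_bfsF (seen, q) l).2)
    ∧ ((q.Nodup ∧ ∀ x ∈ q, pvGet seen x = true) →
        ((List.foldl pvA_bfsF (seen, q) l).2.Nodup ∧
          ∀ x ∈ (List.foldl pvA_bfsF (seen, q) l).2, pvGet (List.foldl pvA_bfsF (seen, q) l).1 x = true))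
    ∧ 2 * pvCntF (List.foldl pvA_bfsF (seen, q) l).1 + (List.foldl pvA_bfsF (seen, q) l).2.length
        ≤ 2 * pvCntF seen + q.length := by
  induction l with
  | nil =>
    intro seen q hlen _ _
    refine ⟨hlen, fun j _ _ h => h, by simp, by simp, by simp, fun x _ _ h => Or.inl h,
      fun h => ⟨h.1, h.2⟩, le_refl _⟩
  | cons tov l ih =>
    intro seen q hlen hb hqb
    have htb := hb tov (by simp)
    rw [List.foldl_cons]
    by_cases hseen : pvGet seen tov = false
    · rw [show pvA_bfsF (seen, q) tov = (PySem.List.pySetD seen tov true, q ++ [tov]) by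
        simp [pvA_bfsF, pvGet] at hseen ⊢; exact hseen]
      have hlen' : ((PySem.List.pySetD seen tov true).length : Int) = n := by
        rw [PySem.List.length_pySetD]; exact hlen
      have hget' : ∀ j, 0 ≤ j → j < n →
          pvGet (PySem.List.pySetD seen tov true) j = if j = tov then true else pvGet seen j :=
        fun j hj0 hj1 => pvGet_set seen tov j true htb.1 (by omega) hj0 (by omega)
      obtain ⟨c1, c2, c3, c4, c5, c6, c7, c8⟩ :=
        ih (PySem.List.pySetD seen tov true) (q ++ [tov]) hlen' (fun x hx => hb x (by simp [hx]))
          (fun x hx => by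
            rcases List.mem_append.1 hx with h | h
            · exact hqb x h
            · simp at h; subst h; exact htb)
      refine ⟨c1, ?_, ?_, ?_, ?_, ?_, ?_, ?_⟩
      · intro j hj0 hj1 hj
        refine c2 j hj0 hj1 ?_
        rw [hget' j hj0 hj1]; split_ifs <;> simp [hj]
      · intro x hx
        rcases List.mem_cons.1 hx with h | h
        · subst h
          refine c2 x htb.1 htb.2 ?_
          rw [hget' x htb.1 htb.2]; simp
        · exact c3 x h
      · intro x hx; exact c4 x (by simp [hx])
      · intro x hx
        rcases c5 x hx with h | h
        · rcases List.mem_append.1 h with h2 | h2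
          · exact Or.inl h2
          · simp at h2; simp [h2]
        · simp [h]
      · intro x hx0 hx1 hx
        rcases c6 x hx0 hx1 hx with h | h
        · rw [hget' x hx0 hx1] at h
          split_ifs at h with h2
          · subst h2; exact Or.inr (c4 x (by simp))
          · exact Or.inl h
        · exact Or.inr h
      · rintro ⟨hnd, htr⟩
        have htovq : tov ∉ q := fun hc => by simp [htr tov hc] at hseen
        refine c7 ⟨?_, ?_⟩
        · rw [List.nodup_append]
          refine ⟨hnd, List.nodup_singleton _, ?_⟩
          intro a ha b hb
          have hb' : b = tov := List.mem_singleton.1 hb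
          subst hb'
          exact fun hab => htovq (hab ▸ ha)
        · intro x hx
          rcases List.mem_append.1 hx with h | h
          · have hxb := hqb x h
            rw [hget' x hxb.1 hxb.2]
            split_ifs with h2
            · rfl
            · exact htr x h
          · simp at h
            rw [hget' x (h ▸ htb.1) (h ▸ htb.2), if_pos h]
      · have := pvCntF_set_true seen tov htb.1 (by omega) hseen
        have hq : (q ++ [tov]).length = q.length + 1 := by simp
        omega
    · rw [show pvA_bfsF (seen, q) tov = (seen, q) from if_neg hseen]
      obtain ⟨c1, c2, c3, c4, c5, c6, c7, c8⟩ := ih seen q hlen (fun x hx => hb x (by simp [hx])) hqb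
      refine ⟨c1, c2, ?_, c4, ?_, c6, c7, c8⟩
      · intro x hx
        rcases List.mem_cons.1 hx with h | h
        · subst h
          exact c2 x htb.1 htb.2 (by revert hseen; cases pvGet seen x <;> simp)
        · exact c3 x h
      · intro x hx
        rcases c5 x hx with h | h
        · exact Or.inl h
        · exact Or.inr (by simp [h])

def pvReach (n : Int) (out_adj : List (List (Int × Int))) (s v : Int) : Prop :=
  Relation.ReflTransGen (pvR n out_adj) s v

theorem pvA_run (n : Int) (out_adj : List (List (Int × Int))) (start : Int) (adj : List (List Int))
    (hstart : 0 ≤ start ∧ start < n)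
    (hadjB : ∀ v, 0 ≤ v → v < n → ∀ w ∈ pvAdjGet adj v, 0 ≤ w ∧ w < n)
    (hadjR : ∀ v, 0 ≤ v → v < n → ∀ w ∈ pvAdjGet adj v, pvR n out_adj v w) :
    ∀ (fuel : Nat) (seen : List Bool) (q : List Int),
    (seen.length : Int) = n →
    q.Nodup →
    (∀ x ∈ q, 0 ≤ x ∧ x < n ∧ pvGet seen x = true) →
    pvGet seen start = true →
    (∀ x, 0 ≤ x → x < n → pvGet seen x = true → pvReach n out_adj start x) →
    (∀ v, 0 ≤ v → v < n → pvGet seen v = true → v ∉ q → ∀ w ∈ pvAdjGet adj v, pvGet seen w = true) →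
    2 * pvCntF seen + q.length < fuel →
    ((pvA_bfs adj fuel seen q).length : Int) = n
    ∧ pvGet (pvA_bfs adj fuel seen q) start = true
    ∧ (∀ x, 0 ≤ x → x < n → pvGet (pvA_bfs adj fuel seen q) x = true → pvReach n out_adj start x)
    ∧ (∀ v, 0 ≤ v → v < n → pvGet (pvA_bfs adj fuel seen q) v = true →
        ∀ w ∈ pvAdjGet adj v, pvGet (pvA_bfs adj fuel seen q) w = true) := by
  intro fuel
  induction fuel with
  | zero => intro seen q _ _ _ _ _ _ hm; omega
  | succ fuel ih =>
    intro seen q hlen hnd hq hst hsound hfront hm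
    match q with
    | [] =>
      refine ⟨hlen, hst, hsound, fun v hv0 hv1 hv w hw => ?_⟩
      exact hfront v hv0 hv1 hv (by simp) w hw
    | v :: rest =>
      have hv := hq v (by simp)
      have hlb : ∀ x ∈ pvAdjGet adj v, 0 ≤ x ∧ x < n := hadjB v hv.1 hv.2.1
      have hreachv : pvReach n out_adj start v := hsound v hv.1 hv.2.1 hv.2.2
      have hlreach : ∀ x ∈ pvAdjGet adj v, pvReach n out_adj start x := fun x hx =>
        Relation.ReflTransGen.tail hreachv (hadjR v hv.1 hv.2.1 x hx)
      have hstep : pvA_bfs adj (fuel + 1) seen (v :: rest) =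
          pvA_bfs adj fuel (List.foldl pvA_bfsF (seen, rest) (pvAdjGet adj v)).1
            (List.foldl pvA_bfsF (seen, rest) (pvAdjGet adj v)).2 := rfl
      rw [hstep]
      obtain ⟨c1, c2, c3, c4, c5, c6, c7, c8⟩ :=
        pvA_fold n (pvAdjGet adj v) seen rest hlen hlb (fun x hx => ⟨(hq x (by simp [hx])).1, (hq x (by simp [hx])).2.1⟩)
      have hrestnd : rest.Nodup := (List.nodup_cons.1 hnd).2
      have hvrest : v ∉ rest := (List.nodup_cons.1 hnd).1
      obtain ⟨d1, d2⟩ := c7 ⟨hrestnd, fun x hx => (hq x (by simp [hx])).2.2⟩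
      have hqb' : ∀ x ∈ (List.foldl pvA_bfsF (seen, rest) (pvAdjGet adj v)).2, 0 ≤ x ∧ x < n := by
        intro x hx
        rcases c5 x hx with h | h
        · exact ⟨(hq x (by simp [h])).1, (hq x (by simp [h])).2.1⟩
        · exact hlb x h
      refine ih _ _ c1 d1 (fun x hx => ⟨(hqb' x hx).1, (hqb' x hx).2, d2 x hx⟩)
        (c2 start hstart.1 hstart.2 hst) ?_ ?_ (by simp at hm ⊢; omega)
      · -- soundness
        intro x hx0 hx1 hx
        rcases c6 x hx0 hx1 hx with h | h
        · exact hsound x hx0 hx1 h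
        · rcases c5 x h with h2 | h2
          · exact hsound x hx0 hx1 (hq x (by simp [h2])).2.2
          · exact hlreach x h2
      · -- frontier
        intro v' hv0 hv1 hv' hnotin w hw
        rcases c6 v' hv0 hv1 hv' with h | h
        · by_cases hvv : v' = v
          · subst hvv; exact c3 w hw
          · have : v' ∉ rest := fun hc => hnotin (c4 v' hc)
            have hnotq : v' ∉ v :: rest := by simp [hvv, this]
            have := hfront v' hv0 hv1 h hnotq w hw
            exact c2 w (hadjB v' hv0 hv1 w hw).1 (hadjB v' hv0 hv1 w hw).2 this
        · exact absurd h hnotin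

theorem pvReach_subset (n : Int) (out_adj : List (List (Int × Int)))
    (hPre : ∀ u ∈ PySem.List.pyRange 0 n 1, ∀ p ∈ PySem.List.pyGetD out_adj u [], 0 ≤ p.1 ∧ p.1 < n)
    (start : Int) (hs0 : 0 ≤ start) (hs1 : start < n) (P : Int → Bool) (hstart : P start = true)
    (hclosed : ∀ u w, 0 ≤ u → u < n → P u = true → pvR n out_adj u w → P w = true) :
    ∀ v, pvReach n out_adj start v → 0 ≤ v ∧ v < n ∧ P v = true := by
  intro v hv
  induction hv with
  | refl => exact ⟨hs0, hs1, hstart⟩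
  | tail hr hstep ih =>
    rename_i u w
    have hw : 0 ≤ w ∧ w < n := by
      rcases hstep with ⟨h0, h1, eid, hmem⟩ | ⟨h0, h1, _, _⟩
      · exact hPre u (PySem.List.mem_pyRange_one.2 ⟨h0, h1⟩) (w, eid) hmem
      · exact ⟨h0, h1⟩
    exact ⟨hw.1, hw.2, hclosed u w ih.1 ih.2.1 ih.2.2 hstep⟩

def pvB_passF (st : List Bool × Bool) (e : Int × Int) : List Bool × Bool :=
  if PySem.List.pyGetD st.1 e.1 false ≠ PySem.List.pyGetD st.1 e.2 false then
    (PySem.List.pySetD (PySem.List.pySetD st.1 e.1 true) e.2 true, true)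
  else st

theorem pvCntT_set_le' (s : List Bool) (i : Int) (h0 : 0 ≤ i) :
    pvCntT s ≤ pvCntT (PySem.List.pySetD s i true) := by
  rw [PySem.List.pySetD_of_nonneg _ _ h0]
  exact pvCntT_set_true_le s i.toNat

theorem pvCntT_doubleset (s : List Bool) (a b : Int) (ha0 : 0 ≤ a) (ha1 : a < s.length)
    (hb0 : 0 ≤ b) (hb1 : b < s.length) (hne : pvGet s a ≠ pvGet s b) :
    pvCntT s + 1 ≤ pvCntT (PySem.List.pySetD (PySem.List.pySetD s a true) b true) := by
  by_cases hga : pvGet s a = false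
  · have h1 : pvCntT (PySem.List.pySetD s a true) = pvCntT s + 1 := by
      rw [PySem.List.pySetD_of_nonneg _ _ ha0]
      exact pvCntT_set_true s a.toNat (by omega) (by rw [← pvGet_eq s a ha0 ha1]; exact hga)
    calc pvCntT s + 1 = pvCntT (PySem.List.pySetD s a true) := h1.symm
      _ ≤ _ := pvCntT_set_le' _ b hb0
  · have hgb : pvGet s b = false := by
      revert hne hga; cases pvGet s a <;> cases pvGet s b <;> simp
    have hab : ¬(b = a) := by
      intro h; rw [h] at hne; exact hne rfl
    have hgb' : pvGet (PySem.List.pySetD s a true) b = false := by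
      rw [pvGet_set s a b true ha0 ha1 hb0 hb1, if_neg hab]; exact hgb
    have hlen : (PySem.List.pySetD s a true).length = s.length := PySem.List.length_pySetD _ _ _
    have h2 : pvCntT (PySem.List.pySetD (PySem.List.pySetD s a true) b true)
        = pvCntT (PySem.List.pySetD s a true) + 1 := by
      rw [PySem.List.pySetD_of_nonneg _ _ hb0]
      exact pvCntT_set_true _ b.toNat (by omega)
        (by rw [← pvGet_eq _ b hb0 (by omega)]; exact hgb')
    have h3 := pvCntT_set_le' s a ha0
    omega

theorem pvB_flag_mono (l : List (Int × Int)) :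
    ∀ s : List Bool, (List.foldl pvB_passF (s, true) l).2 = true := by
  induction l with
  | nil => intro s; rfl
  | cons f l ih =>
    intro s
    rw [List.foldl_cons]
    by_cases h : PySem.List.pyGetD s f.1 false ≠ PySem.List.pyGetD s f.2 false
    · rw [show pvB_passF (s, true) f =
        (PySem.List.pySetD (PySem.List.pySetD s f.1 true) f.2 true, true) from if_pos h]
      exact ih _
    · rw [show pvB_passF (s, true) f = (s, true) from if_neg h]
      exact ih s

theorem pvB_fold (n : Int) (out_adj : List (List (Int × Int))) (start : Int) (l : List (Int × Int)) :
    ∀ (seen : List Bool) (c : Bool), (seen.length : Int) = n →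
    (∀ e ∈ l, (0 ≤ e.1 ∧ e.1 < n) ∧ (0 ≤ e.2 ∧ e.2 < n) ∧ pvR n out_adj e.1 e.2) →
    (((List.foldl pvB_passF (seen, c) l).1.length : Int) = n)
    ∧ (∀ j, 0 ≤ j → j < n → pvGet seen j = true → pvGet (List.foldl pvB_passF (seen, c) l).1 j = true)
    ∧ ((∀ x, 0 ≤ x → x < n → pvGet seen x = true → pvReach n out_adj start x) →
        (∀ x, 0 ≤ x → x < n → pvGet (List.foldl pvB_passF (seen, c) l).1 x = true → pvReach n out_adj start x))
    ∧ pvCntT seen ≤ pvCntT (List.foldl pvB_passF (seen, c) l).1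
    ∧ ((List.foldl pvB_passF (seen, c) l).2 = false →
        (List.foldl pvB_passF (seen, c) l).1 = seen ∧ ∀ e ∈ l, pvGet seen e.1 = pvGet seen e.2)
    ∧ ((List.foldl pvB_passF (seen, c) l).2 = true → c = true ∨ pvCntT seen + 1 ≤ pvCntT (List.foldl pvB_passF (seen, c) l).1) := by
  induction l with
  | nil =>
    intro seen c hlen _
    exact ⟨hlen, fun j _ _ h => h, fun h => h, le_refl _, fun _ => ⟨rfl, by simp⟩, fun h => Or.inl h⟩
  | cons e l ih =>
    intro seen c hlen hE
    have he := hE e (by simp)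
    rw [List.foldl_cons]
    by_cases hne : pvGet seen e.1 ≠ pvGet seen e.2
    · rw [show pvB_passF (seen, c) e =
          (PySem.List.pySetD (PySem.List.pySetD seen e.1 true) e.2 true, true) from if_pos hne]
      have hlen' : ((PySem.List.pySetD (PySem.List.pySetD seen e.1 true) e.2 true).length : Int) = n := by
        rw [PySem.List.length_pySetD, PySem.List.length_pySetD]; exact hlen
      have hget' : ∀ j, 0 ≤ j → j < n →
          pvGet (PySem.List.pySetD (PySem.List.pySetD seen e.1 true) e.2 true) j =
            if j = e.2 then true else if j = e.1 then true else pvGet seen j := by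
        intro j hj0 hj1
        rw [pvGet_set _ e.2 j true he.2.1.1 (by rw [PySem.List.length_pySetD]; omega) hj0
          (by rw [PySem.List.length_pySetD]; omega)]
        split_ifs with h1 h2
        · rfl
        · rw [pvGet_set seen e.1 j true he.1.1 (by omega) hj0 (by omega), if_pos h2]
        · rw [pvGet_set seen e.1 j true he.1.1 (by omega) hj0 (by omega), if_neg h2]
      obtain ⟨c1, c2, c3, c4, c5, c6⟩ := ih (PySem.List.pySetD (PySem.List.pySetD seen e.1 true) e.2 true) true hlen' (fun x hx => hE x (by simp [hx]))
      have hcnt : pvCntT seen + 1 ≤ pvCntT (PySem.List.pySetD (PySem.List.pySetD seen e.1 true) e.2 true) :=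
        pvCntT_doubleset seen e.1 e.2 he.1.1 (by omega) he.2.1.1 (by omega) hne
      refine ⟨c1, ?_, ?_, by omega, ?_, fun _ => Or.inr (by omega)⟩
      · intro j hj0 hj1 hj
        refine c2 j hj0 hj1 ?_
        rw [hget' j hj0 hj1]; split_ifs <;> simp [hj]
      · intro hsound
        refine c3 ?_
        intro x hx0 hx1 hx
        rw [hget' x hx0 hx1] at hx
        split_ifs at hx with h1 h2
        · -- x = e.2
          by_cases hg1 : pvGet seen e.1 = true
          · exact h1 ▸ Relation.ReflTransGen.tail (hsound e.1 he.1.1 he.1.2 hg1) he.2.2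
          · refine hsound x hx0 hx1 ?_
            have hg2 : pvGet seen e.2 = true := by
              revert hne hg1; cases pvGet seen e.1 <;> cases pvGet seen e.2 <;> simp
            rw [h1]; exact hg2
        · -- x = e.1
          by_cases hg2 : pvGet seen e.2 = true
          · exact h2 ▸ Relation.ReflTransGen.tail (hsound e.2 he.2.1.1 he.2.1.2 hg2) (Or.symm he.2.2)
          · refine hsound x hx0 hx1 ?_
            have hg1 : pvGet seen e.1 = true := by
              revert hne hg2; cases pvGet seen e.1 <;> cases pvGet seen e.2 <;> simp
            rw [h2]; exact hg1
        · exact hsound x hx0 hx1 hx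
      · intro hfalse
        rw [pvB_flag_mono l _] at hfalse; cases hfalse
    · rw [show pvB_passF (seen, c) e = (seen, c) from if_neg hne]
      obtain ⟨c1, c2, c3, c4, c5, c6⟩ := ih seen c hlen (fun x hx => hE x (by simp [hx]))
      refine ⟨c1, c2, c3, c4, ?_, c6⟩
      intro hfalse
      rcases c5 hfalse with ⟨h1, h2⟩
      refine ⟨h1, ?_⟩
      intro f hf
      rcases List.mem_cons.1 hf with h | h
      · subst h; by_cases hh : pvGet seen f.1 = pvGet seen f.2
        · exact hh
        · exact absurd hh hne
      · exact h2 f h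

theorem pvB_pass_eqF (edges : List (Int × Int)) (seen : List Bool) :
    pvB_pass edges seen = List.foldl pvB_passF (seen, false) edges := rfl

theorem pvB_run (n : Int) (out_adj : List (List (Int × Int))) (start : Int)
    (edges : List (Int × Int)) (hstart : 0 ≤ start ∧ start < n)
    (hE : ∀ e ∈ edges, (0 ≤ e.1 ∧ e.1 < n) ∧ (0 ≤ e.2 ∧ e.2 < n) ∧ pvR n out_adj e.1 e.2) :
    ∀ (fuel : Nat) (seen : List Bool), (seen.length : Int) = n →
    pvGet seen start = true →
    (∀ x, 0 ≤ x → x < n → pvGet seen x = true → pvReach n out_adj start x) →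
    (n : Int) < pvCntT seen + fuel →
    ((pvB_loop edges fuel seen).length : Int) = n
    ∧ pvGet (pvB_loop edges fuel seen) start = true
    ∧ (∀ x, 0 ≤ x → x < n → pvGet (pvB_loop edges fuel seen) x = true → pvReach n out_adj start x)
    ∧ (∀ e ∈ edges, pvGet (pvB_loop edges fuel seen) e.1 = pvGet (pvB_loop edges fuel seen) e.2) := by
  intro fuel
  induction fuel with
  | zero =>
    intro seen hlen _ _ hm
    exfalso
    have := pvCntT_le seen
    omega
  | succ fuel ih =>
    intro seen hlen hst hsound hm
    obtain ⟨c1, c2, c3, c4, c5, c6⟩ := pvB_fold n out_adj start edges seen false hlen hE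
    rw [show pvB_loop edges (fuel + 1) seen =
      (if (pvB_pass edges seen).2 then pvB_loop edges fuel (pvB_pass edges seen).1
        else (pvB_pass edges seen).1) from rfl]
    by_cases hc : (pvB_pass edges seen).2 = true
    · rw [if_pos hc]
      rw [pvB_pass_eqF] at hc ⊢
      rcases c6 hc with h | h
      · cases h
      · exact ih _ c1 (c2 start hstart.1 hstart.2 hst) (c3 hsound) (by omega)
    · rw [if_neg hc]
      rw [pvB_pass_eqF] at hc ⊢
      have hc' : (List.foldl pvB_passF (seen, false) edges).2 = false := by
        revert hc; cases (List.foldl pvB_passF (seen, false) edges).2 <;> simp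
      obtain ⟨h1, h2⟩ := c5 hc'
      rw [h1]
      exact ⟨hlen, hst, hsound, h2⟩

-- edge-list characterization
theorem pvB_edges_char (out_adj : List (List (Int × Int))) :
    ∀ (us : List Int) (acc : List (Int × Int)) (e : Int × Int),
    (e ∈ us.foldl (fun acc u => acc ++ (PySem.List.pyGetD out_adj u []).map (fun p => (u, p.1))) acc ↔
      e ∈ acc ∨ ∃ u ∈ us, ∃ p ∈ PySem.List.pyGetD out_adj u [], e = (u, p.1)) := by
  intro us
  induction us with
  | nil => intro acc e; simp
  | cons u us ih =>
    intro acc e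
    rw [List.foldl_cons, ih]
    simp only [List.mem_append, List.mem_map, List.mem_cons]
    constructor
    · rintro ((h | ⟨p, hp, he⟩) | ⟨u', hu', p, hp, he⟩)
      · exact Or.inl h
      · exact Or.inr ⟨u, Or.inl rfl, p, hp, he.symm⟩
      · exact Or.inr ⟨u', Or.inr hu', p, hp, he⟩
    · rintro (h | ⟨u', hu' | hu', p, hp, he⟩)
      · exact Or.inl (Or.inl h)
      · subst hu'; exact Or.inl (Or.inr ⟨p, hp, he.symm⟩)
      · exact Or.inr ⟨u', hu', p, hp, he⟩


theorem pvSeen0_len (n : Int) (start : Int) (hn : 0 < n) :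
    (((PySem.List.pySetD (List.replicate n.toNat false) start true).length : Nat) : Int) = n := by
  rw [PySem.List.length_pySetD]; simp; omega

theorem pvSeen0_get (n : Int) (start j : Int) (hs0 : 0 ≤ start) (hs1 : start < n)
    (hj0 : 0 ≤ j) (hj1 : j < n) :
    pvGet (PySem.List.pySetD (List.replicate n.toNat false) start true) j = decide (j = start) := by
  have hlen : ((List.replicate n.toNat (false : Bool)).length : Int) = n := by simp; omega
  rw [pvGet_set _ start j true hs0 (by omega) hj0 (by omega)]
  split_ifs with h
  · simp [h]
  · rw [show decide (j = start) = false by simp [h]]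
    rw [pvGet_eq _ j hj0 (by omega)]
    exact List.getElem_replicate _

theorem pvSeen0_cntT (n : Int) (start : Int) (hs0 : 0 ≤ start) (hs1 : start < n) :
    pvCntT (PySem.List.pySetD (List.replicate n.toNat false) start true) = 1 := by
  rw [PySem.List.pySetD_of_nonneg _ _ hs0]
  have hb : start.toNat < (List.replicate n.toNat (false : Bool)).length := by simp; omega
  have hg : (List.replicate n.toNat (false : Bool))[start.toNat]'hb = false := List.getElem_replicate _
  rw [pvCntT_set_true _ _ hb hg]
  have : List.count true (List.replicate n.toNat (false : Bool)) = 0 := by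
    simp [List.count_replicate]
  simp [pvCntT, this]

theorem pvA_adj_char (n : Int) (out_adj : List (List (Int × Int)))
    (hPre4 : ∀ u ∈ PySem.List.pyRange 0 n 1, ∀ p ∈ PySem.List.pyGetD out_adj u [], 0 ≤ p.1 ∧ p.1 < n) :
    ∀ v w, 0 ≤ v → v < n →
    (w ∈ pvAdjGet (pvA_buildAdj n out_adj) v ↔ pvR n out_adj v w) := by
  intro v w hv0 hv1
  have hn : 0 < n := by omega
  have heq : pvA_buildAdj n out_adj = (PySem.List.pyRange 0 n 1).foldl
      (fun adj u => pvA_inner u (PySem.List.pyGetD out_adj u []) adj) (List.replicate n.toNat []) := rfl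
  rw [heq, pvA_outer_char n out_adj _ _ (by simp; omega)
    (fun u hu => ⟨(PySem.List.mem_pyRange_one.1 hu).1, (PySem.List.mem_pyRange_one.1 hu).2⟩)
    hPre4 v w hv0 hv1]
  have hbase : pvAdjGet (List.replicate n.toNat ([] : List Int)) v = [] := by
    rw [show pvAdjGet (List.replicate n.toNat ([] : List Int)) v = _ from
      PySem.List.pyGetD_eq_getElem _ _ hv0 (by simp; omega)]
    exact List.getElem_replicate _
  rw [hbase]
  unfold pvR pvEdge
  simp only [List.not_mem_nil, false_or, PySem.List.mem_pyRange_one]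
  constructor
  · rintro (⟨⟨h1, h2⟩, h3⟩ | ⟨⟨h1, h2⟩, h3, h4, h5⟩)
    · exact Or.inl ⟨hv0, hv1, h3⟩
    · exact Or.inr ⟨h3, h4, h5⟩
  · rintro (⟨h1, h2, h3⟩ | ⟨h1, h2, h3⟩)
    · exact Or.inl ⟨⟨hv0, hv1⟩, h3⟩
    · exact Or.inr ⟨⟨h1, h2⟩, h1, h2, h3⟩

theorem pvR_bounds (n : Int) (out_adj : List (List (Int × Int)))
    (hPre4 : ∀ u ∈ PySem.List.pyRange 0 n 1, ∀ p ∈ PySem.List.pyGetD out_adj u [], 0 ≤ p.1 ∧ p.1 < n)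
    (u w : Int) (h : pvR n out_adj u w) : 0 ≤ w ∧ w < n := by
  rcases h with ⟨h0, h1, eid, hmem⟩ | ⟨h0, h1, _, _⟩
  · exact hPre4 u (PySem.List.mem_pyRange_one.2 ⟨h0, h1⟩) (w, eid) hmem
  · exact ⟨h0, h1⟩

theorem pvA_char (n : Int) (out_adj : List (List (Int × Int)))
    (hPre4 : ∀ u ∈ PySem.List.pyRange 0 n 1, ∀ p ∈ PySem.List.pyGetD out_adj u [], 0 ≤ p.1 ∧ p.1 < n)
    (start : Int) (hs0 : 0 ≤ start) (hs1 : start < n) :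
    ∀ v, 0 ≤ v → v < n →
    (pvGet (pvA_bfs (pvA_buildAdj n out_adj) (2 * n.toNat + 1)
        (PySem.List.pySetD (List.replicate n.toNat false) start true) [start]) v = true
      ↔ pvReach n out_adj start v) := by
  have hn : 0 < n := by omega
  have hchar := pvA_adj_char n out_adj hPre4
  have hadjR : ∀ v, 0 ≤ v → v < n → ∀ w ∈ pvAdjGet (pvA_buildAdj n out_adj) v, pvR n out_adj v w :=
    fun v hv0 hv1 w hw => (hchar v w hv0 hv1).1 hw
  have hadjB : ∀ v, 0 ≤ v → v < n → ∀ w ∈ pvAdjGet (pvA_buildAdj n out_adj) v, 0 ≤ w ∧ w < n :=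
    fun v hv0 hv1 w hw => pvR_bounds n out_adj hPre4 v w ((hchar v w hv0 hv1).1 hw)
  have hlen0 := pvSeen0_len n start hn
  have hget0 : ∀ j, 0 ≤ j → j < n →
      pvGet (PySem.List.pySetD (List.replicate n.toNat false) start true) j = decide (j = start) :=
    fun j hj0 hj1 => pvSeen0_get n start j hs0 hs1 hj0 hj1
  have hcntT0 := pvSeen0_cntT n start hs0 hs1
  have hcntF0 : pvCntT (PySem.List.pySetD (List.replicate n.toNat false) start true)
      + pvCntF (PySem.List.pySetD (List.replicate n.toNat false) start true)
      = (PySem.List.pySetD (List.replicate n.toNat false) start true).length := pvCnt_add _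
  obtain ⟨a1, a2, a3, a4⟩ := pvA_run n out_adj start (pvA_buildAdj n out_adj) ⟨hs0, hs1⟩ hadjB hadjR
    (2 * n.toNat + 1) (PySem.List.pySetD (List.replicate n.toNat false) start true) [start]
    hlen0 (List.nodup_singleton _)
    (fun x hx => by
      have hx' : x = start := List.mem_singleton.1 hx
      subst hx'
      exact ⟨hs0, hs1, by rw [hget0 x hs0 hs1]; simp⟩)
    (by rw [hget0 start hs0 hs1]; simp)
    (fun x hx0 hx1 hxt => by
      have : x = start := by
        have := hget0 x hx0 hx1
        rw [hxt] at this
        simpa using this.symm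
      subst this
      exact Relation.ReflTransGen.refl)
    (fun v hv0 hv1 hvt hvq w hw => by
      exfalso
      have : v = start := by
        have := hget0 v hv0 hv1
        rw [hvt] at this
        simpa using this.symm
      subst this
      exact hvq (by simp))
    (by
      have : ((PySem.List.pySetD (List.replicate n.toNat false) start true).length : Int) = n := hlen0
      simp only [List.length_cons, List.length_nil]
      omega)
  intro v hv0 hv1
  constructor
  · exact a3 v hv0 hv1
  · intro hr
    exact (pvReach_subset n out_adj hPre4 start hs0 hs1 _ a2
      (fun u w hu0 hu1 hPu hR => a4 u hu0 hu1 hPu w ((hchar u w hu0 hu1).2 hR)) v hr).2.2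

theorem pvB_char (n : Int) (out_adj : List (List (Int × Int)))
    (hPre4 : ∀ u ∈ PySem.List.pyRange 0 n 1, ∀ p ∈ PySem.List.pyGetD out_adj u [], 0 ≤ p.1 ∧ p.1 < n)
    (start : Int) (hs0 : 0 ≤ start) (hs1 : start < n) :
    ∀ v, 0 ≤ v → v < n →
    (pvGet (pvB_loop (pvB_edges n out_adj) n.toNat
        (PySem.List.pySetD (List.replicate n.toNat false) start true)) v = true
      ↔ pvReach n out_adj start v) := by
  have hn : 0 < n := by omega
  have hEdges : ∀ e ∈ pvB_edges n out_adj,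
      (0 ≤ e.1 ∧ e.1 < n) ∧ (0 ≤ e.2 ∧ e.2 < n) ∧ pvR n out_adj e.1 e.2 := by
    intro e he
    have := (pvB_edges_char out_adj (PySem.List.pyRange 0 n 1) [] e).1 he
    rcases this with h | ⟨u, hu, p, hp, hep⟩
    · simp at h
    · have hub := PySem.List.mem_pyRange_one.1 hu
      have hpb := hPre4 u hu p hp
      have hEdge : pvEdge n out_adj e.1 e.2 := by
        rw [hep]
        exact ⟨hub.1, hub.2, p.2, by simpa using hp⟩
      refine ⟨by rw [hep]; exact ⟨hub.1, hub.2⟩, by rw [hep]; exact hpb, Or.inl hEdge⟩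
  have hlen0 := pvSeen0_len n start hn
  have hget0 : ∀ j, 0 ≤ j → j < n →
      pvGet (PySem.List.pySetD (List.replicate n.toNat false) start true) j = decide (j = start) :=
    fun j hj0 hj1 => pvSeen0_get n start j hs0 hs1 hj0 hj1
  have hcntT0 := pvSeen0_cntT n start hs0 hs1
  obtain ⟨b1, b2, b3, b4⟩ := pvB_run n out_adj start (pvB_edges n out_adj) ⟨hs0, hs1⟩ hEdges
    n.toNat (PySem.List.pySetD (List.replicate n.toNat false) start true)
    hlen0 (by rw [hget0 start hs0 hs1]; simp)
    (fun x hx0 hx1 hxt => by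
      have : x = start := by
        have := hget0 x hx0 hx1
        rw [hxt] at this
        simpa using this.symm
      subst this
      exact Relation.ReflTransGen.refl)
    (by rw [hcntT0]; omega)
  intro v hv0 hv1
  constructor
  · exact b3 v hv0 hv1
  · intro hr
    refine (pvReach_subset n out_adj hPre4 start hs0 hs1 _ b2 ?_ v hr).2.2
    intro u w hu0 hu1 hPu hR
    rcases hR with hE | hE
    · have hmem : (u, w) ∈ pvB_edges n out_adj := by
        apply (pvB_edges_char out_adj (PySem.List.pyRange 0 n 1) [] (u, w)).2
        rcases hE with ⟨h0, h1, eid, hmem⟩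
        exact Or.inr ⟨u, PySem.List.mem_pyRange_one.2 ⟨h0, h1⟩, (w, eid), hmem, rfl⟩
      have := b4 (u, w) hmem
      simpa using this ▸ hPu
    · have hmem : (w, u) ∈ pvB_edges n out_adj := by
        apply (pvB_edges_char out_adj (PySem.List.pyRange 0 n 1) [] (w, u)).2
        rcases hE with ⟨h0, h1, eid, hmem⟩
        exact Or.inr ⟨w, PySem.List.mem_pyRange_one.2 ⟨h0, h1⟩, (u, eid), hmem, rfl⟩
      have := b4 (w, u) hmem
      simp at this
      rw [this]
      exact hPu

-- ===== VERDICT (by name: the statement is the Claim_ definition above) =====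
theorem pvAll_congr {α : Type} (l : List α) (p q : α → Bool) (h : ∀ a ∈ l, p a = q a) :
    l.all p = l.all q := by
  induction l with
  | nil => rfl
  | cons a l ih => simp only [List.all_cons, h a (by simp), ih (fun b hb => h b (by simp [hb]))]

theorem is_weakly_connected_nonzero_directed_spec : Claim_equal_is_weakly_connected_nonzero_directed := by
  intro n out_adj indeg outdeg _ hpre
  obtain ⟨hl1, hl2, hl3, hPre4⟩ := hpre
  unfold Spec_is_weakly_connected_nonzero_directed
  unfold is_weakly_connected_nonzero_directed is_weakly_connected_nonzero_directed_alt
  cases hfind : (PySem.List.pyRange 0 n 1).find?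
      (fun v => decide (0 < PySem.List.pyGetD indeg v 0 + PySem.List.pyGetD outdeg v 0)) with
  | none => rfl
  | some start =>
    have hsmem := PySem.List.mem_pyRange_one.1 (List.mem_of_find?_eq_some hfind)
    have hs0 : 0 ≤ start := hsmem.1
    have hs1 : start < n := hsmem.2
    have hA := pvA_char n out_adj hPre4 start hs0 hs1
    have hB := pvB_char n out_adj hPre4 start hs0 hs1
    have hpt : ∀ v ∈ PySem.List.pyRange 0 n 1,
        (if 0 < PySem.List.pyGetD indeg v 0 + PySem.List.pyGetD outdeg v 0 then
          PySem.List.pyGetD (pvA_bfs (pvA_buildAdj n out_adj) (2 * n.toNat + 1)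
            (PySem.List.pySetD (List.replicate n.toNat false) start true) [start]) v false
        else true)
        = (if 0 < PySem.List.pyGetD indeg v 0 + PySem.List.pyGetD outdeg v 0 then
          PySem.List.pyGetD (pvB_loop (pvB_edges n out_adj) n.toNat
            (PySem.List.pySetD (List.replicate n.toNat false) start true)) v false
        else true) := by
      intro v hv
      have hvb := PySem.List.mem_pyRange_one.1 hv
      by_cases hdeg : 0 < PySem.List.pyGetD indeg v 0 + PySem.List.pyGetD outdeg v 0
      · rw [if_pos hdeg, if_pos hdeg]
        have hiff := (hA v hvb.1 hvb.2).trans (hB v hvb.1 hvb.2).symm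
        have h1 : pvGet (pvA_bfs (pvA_buildAdj n out_adj) (2 * n.toNat + 1)
            (PySem.List.pySetD (List.replicate n.toNat false) start true) [start]) v
          = pvGet (pvB_loop (pvB_edges n out_adj) n.toNat
            (PySem.List.pySetD (List.replicate n.toNat false) start true)) v := by
          by_cases hA1 : pvGet (pvA_bfs (pvA_buildAdj n out_adj) (2 * n.toNat + 1)
              (PySem.List.pySetD (List.replicate n.toNat false) start true) [start]) v = true
          · rw [hA1, hiff.1 hA1]
          · by_cases hB1 : pvGet (pvB_loop (pvB_edges n out_adj) n.toNat
                (PySem.List.pySetD (List.replicate n.toNat false) start true)) v = true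
            · exact absurd (hiff.2 hB1) hA1
            · rw [Bool.not_eq_true] at hA1 hB1
              rw [hA1, hB1]
        exact h1
      · rw [if_neg hdeg, if_neg hdeg]
    exact pvAll_congr _ _ _ hpt
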